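-- pv_equiv track=rewrite | github.com/weibin666/wb_algorithm | hw/哈希表/05_魔法骑士停留试炼.py | findTopVehicle
-- ===== SOURCE A (Python) =====
-- from typing import List
-- from collections import defaultdict
--
-- def findTopVehicle(records: List[str], month: int) -> str:
--     # 创建默认字典，值为 [总停留时间, 停留次数]
--     '''
--     defaultdict(lambda: [0, 0]) 定义方法学着点
--     '''
--     stats = defaultdict(lambda: [0, 0])
--
--     # 用于记录当前最优的车牌号和对应的 [总时间, 次数]
--     best_plate = None
--     best_time = -1
--     best_count = -1
--
--     for record in records:
--         parts = record.strip().split()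
--         if len(parts) != 3:
--             continue  # 跳过格式非法记录
--
--         plate, date, duration_str = parts
--         try:
--             cur_month = int(date.split('-')[1])  # 提取月份
--             if cur_month != month:
--                 continue  # 非目标月份，跳过
--
--             duration = int(duration_str)
--             stats[plate][0] += duration     # 累加停留时间
--             stats[plate][1] += 1            # 累加停留次数
--
--             total_time, count = stats[plate]
--
--             # 判断当前记录是否为更优的车牌：
--             # 优先级：时间 > 次数 > 车牌号字典序
--             if (total_time > best_time or
--                 (total_time == best_time and count > best_count) or
--                 (total_time == best_time and count == best_count and (best_plate is None or plate < best_plate))):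
--                 best_plate = plate
--                 best_time = total_time
--                 best_count = count
--
--         except:
--             continue  # 忽略无法转换或非法格式
--
--     # 若未找到符合条件的记录，则输出 NULL
--     return best_plate if best_plate is not None else "NULL"
-- ===== SOURCE B (Python) =====
-- def findTopVehicle(records, month):
--     # Phase 1: aggregate per-plate [total_time, count] (same parsing/filtering as before).
--     stats = {}
--     for record in records:
--         parts = record.strip().split()
--         if len(parts) != 3:
--             continue
--         plate, date, duration_str = parts
--         try:
--             if int(date.split('-')[1]) != month:
--                 continue
--             duration = int(duration_str)
--         except:
--             continue
--         t, c = stats.get(plate, (0, 0))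
--         stats[plate] = (t + duration, c + 1)
--     # Phase 2: pick the winner in one separate pass.
--     if not stats:
--         return "NULL"
--     return min(stats.items(), key=lambda kv: (-kv[1][0], -kv[1][1], kv[0]))[0]
-- ===== Notes on version B (the rewrite author's own statement) =====
-- stated objective: simpler
-- what changed: A's inline running-best bookkeeping (three mutable best_* variables updated inside the aggregation loop) is removed; B aggregates plate -> (total_time, count) first and then picks the winner in one separate pass with min(items, key=(-total, -count, plate)), returning 'NULL' on an empty dict.
-- outside the precondition, e.g. on findTopVehicle(['A 0-1 -2'], 1): A returns 'NULL', B returns 'A'; on findTopVehicle(['A 0-1 5', 'A 0-1 -5', 'B 0-1 3'], 1): A returns 'A', B returns 'B'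
import Mathlib
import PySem

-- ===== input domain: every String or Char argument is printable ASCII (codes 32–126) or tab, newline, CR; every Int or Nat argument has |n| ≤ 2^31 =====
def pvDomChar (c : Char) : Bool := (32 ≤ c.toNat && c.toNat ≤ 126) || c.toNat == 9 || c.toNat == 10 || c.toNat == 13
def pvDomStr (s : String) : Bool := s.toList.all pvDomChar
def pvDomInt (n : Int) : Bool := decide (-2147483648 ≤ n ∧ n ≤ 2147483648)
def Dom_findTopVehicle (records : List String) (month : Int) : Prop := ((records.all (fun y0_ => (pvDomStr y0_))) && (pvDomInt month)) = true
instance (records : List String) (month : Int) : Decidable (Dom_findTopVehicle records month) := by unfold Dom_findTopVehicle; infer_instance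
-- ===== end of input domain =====

-- B replaces A's inline running-best bookkeeping by a two-phase decomposition (aggregate per-plate totals
-- first, then one separate min-by-key selection pass); objective: simpler.

-- Shared record parsing (both Pythons contain the identical strip/split/len!=3/month-filter/int-conversion lines):
-- returns (plate, duration) for a record that survives all filters, none where the Python 'continue's.
def pvParse (record : String) (month : Int) : Option (String × Int) :=
  match PySem.Str.split₀ (PySem.Str.strip record) with
  | [plate, date, durationStr] =>
    match PySem.Str.split? date "-" with
    | none => none                                           -- unreachable: the separator "-" is nonempty
    | some dateParts =>
      match PySem.List.pyGet? dateParts 1 with               -- date.split('-')[1]; none = IndexError, caught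
      | none => none
      | some mstr =>
        match PySem.Int.ofStr? mstr with                     -- int(...); none = ValueError, caught
        | none => none
        | some curMonth =>
          if curMonth ≠ month then none
          else
            match PySem.Int.ofStr? durationStr with          -- int(duration_str); none = ValueError, caught
            | none => none
            | some duration => some (plate, duration)
  | _ => none                                                -- len(parts) != 3

-- ===== PORT A =====
-- 'best_plate is None or plate < best_plate' (short-circuit)
def pvNoneOrLt (o : Option String) (p : String) : Bool :=
  match o with
  | none => true
  | some b => decide (p < b)

-- loop body of A: state = (stats, best_plate, best_time, best_count)
def pvStepA (month : Int) (st : PySem.Dict String (Int × Int) × Option String × Int × Int)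
    (record : String) : PySem.Dict String (Int × Int) × Option String × Int × Int :=
  match pvParse record month with
  | none => st
  | some (plate, duration) =>
    let tc := st.1.getD plate (0, 0)                            -- defaultdict: stats[plate] starts at [0,0]
    let stats := st.1.insert plate (tc.1 + duration, tc.2 + 1)  -- stats[plate][0] += duration; stats[plate][1] += 1
    let totalTime := (stats.getD plate (0, 0)).1                -- total_time, count = stats[plate]
    let count := (stats.getD plate (0, 0)).2
    if decide (totalTime > st.2.2.1) ||
       (totalTime == st.2.2.1 && decide (count > st.2.2.2)) ||
       (totalTime == st.2.2.1 && count == st.2.2.2 && pvNoneOrLt st.2.1 plate) then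
      (stats, some plate, totalTime, count)
    else
      (stats, st.2.1, st.2.2.1, st.2.2.2)

def findTopVehicle (records : List String) (month : Int) : String :=
  match (records.foldl (pvStepA month) (PySem.Dict.empty, none, -1, -1)).2.1 with
  | some p => p
  | none => "NULL"

-- ===== PORT B =====
-- phase 1 loop body: aggregate stats only
def pvStepStats (month : Int) (stats : PySem.Dict String (Int × Int)) (record : String) :
    PySem.Dict String (Int × Int) :=
  match pvParse record month with
  | none => stats
  | some (plate, duration) =>
    let tc := stats.getD plate (0, 0)
    stats.insert plate (tc.1 + duration, tc.2 + 1)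

-- key(kv) = (-total, -count, plate) compared lexicographically: 'key of a < key of b'
def pvKeyLt (a b : String × Int × Int) : Bool :=
  decide (b.2.1 < a.2.1) ||
    (a.2.1 == b.2.1 && (decide (b.2.2 < a.2.2) || (a.2.2 == b.2.2 && decide (a.1 < b.1))))

-- hand port of min(items, key=...): first element with minimal key (exact: Python's min keeps the earlier on ties)
def pvMinBy : List (String × Int × Int) → Option (String × Int × Int)
  | [] => none
  | x :: xs => some (xs.foldl (fun best y => if pvKeyLt y best then y else best) x)

def findTopVehicle_alt (records : List String) (month : Int) : String :=
  match pvMinBy (records.foldl (pvStepStats month) PySem.Dict.empty).items with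
  | none => "NULL"
  | some kv => kv.1

-- ===== PRECONDITION & SPEC =====
-- Pre_ restricts to the task's natural domain of nonnegative stay durations: it excludes inputs where some
-- record that passes all of A's filters carries a NEGATIVE parsed duration (a stay time is nonnegative); there
-- A's incremental running best can go stale (or stay at its -1 sentinel and yield "NULL"), values B does not reproduce.
def Pre_findTopVehicle (records : List String) (month : Int) : Prop :=
  (records.all (fun r =>
    match pvParse r month with
    | some pd => decide (0 ≤ pd.2)
    | none => true)) = true
instance (records : List String) (month : Int) : Decidable (Pre_findTopVehicle records month) := by
  unfold Pre_findTopVehicle; infer_instance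

def pvWitness_findTopVehicle : List String × Int :=
  (["AB 2024-05-01 7", "CD 2024-05-02 7", "not a record"], 5)

def Spec_findTopVehicle (records : List String) (month : Int) (out : String) : Prop := out = findTopVehicle_alt records month
instance (records : List String) (month : Int) (out : String) : Decidable (Spec_findTopVehicle records month out) := by unfold Spec_findTopVehicle; infer_instance

-- ===== CLAIM (what is proved, stated in full; the proofs are below) =====
def Claim_equal_findTopVehicle : Prop := ∀ (records : List String) (month : Int), Dom_findTopVehicle records month → Pre_findTopVehicle records month → Spec_findTopVehicle records month (findTopVehicle records month)

-- ===== LEMMAS AND PROOFS =====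

theorem pvKeyLt_irrefl (a : String × Int × Int) : pvKeyLt a a = false := by
  simp [pvKeyLt]

theorem pvKeyLt_trans {a b c : String × Int × Int}
    (h1 : pvKeyLt a b = true) (h2 : pvKeyLt b c = true) : pvKeyLt a c = true := by
  simp only [pvKeyLt, Bool.or_eq_true, Bool.and_eq_true, decide_eq_true_eq, beq_iff_eq] at *
  rcases h1 with h1 | ⟨e1, h1 | ⟨e1', h1⟩⟩ <;> rcases h2 with h2 | ⟨e2, h2 | ⟨e2', h2⟩⟩
  · exact Or.inl (lt_trans h2 h1)
  · exact Or.inl (by omega)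
  · exact Or.inl (by omega)
  · exact Or.inl (by omega)
  · exact Or.inr ⟨by omega, Or.inl (by omega)⟩
  · exact Or.inr ⟨by omega, Or.inl (by omega)⟩
  · exact Or.inl (by omega)
  · exact Or.inr ⟨by omega, Or.inl (by omega)⟩
  · exact Or.inr ⟨by omega, Or.inr ⟨by omega, lt_trans h1 h2⟩⟩

theorem pvKeyLt_asymm {a b : String × Int × Int}
    (h1 : pvKeyLt a b = true) (h2 : pvKeyLt b a = true) : False := by
  have := pvKeyLt_trans h1 h2
  rw [pvKeyLt_irrefl] at this
  exact Bool.false_ne_true this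

theorem pvKeyLt_total {a b : String × Int × Int} (h : a.1 ≠ b.1)
    (hn : pvKeyLt a b = false) : pvKeyLt b a = true := by
  have hn' : ¬ (pvKeyLt a b = true) := by simp [hn]
  simp only [pvKeyLt, Bool.or_eq_true, Bool.and_eq_true, decide_eq_true_eq, beq_iff_eq] at hn' ⊢
  push_neg at hn'
  obtain ⟨h1, h2⟩ := hn'
  rcases lt_trichotomy a.2.1 b.2.1 with ht | ht | ht
  · exact Or.inl ht
  · obtain ⟨h4, h5⟩ := h2 ht
    rcases lt_trichotomy a.2.2 b.2.2 with hc | hc | hc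
    · exact Or.inr ⟨ht.symm, Or.inl hc⟩
    · have h6 := h5 hc
      rcases lt_or_gt_of_ne h with hs | hs
      · exact absurd hs (not_lt.mpr h6)
      · exact Or.inr ⟨ht.symm, Or.inr ⟨hc.symm, hs⟩⟩
    · omega
  · omega

-- the flat three-clause condition of A is the nested lexicographic key comparison
theorem pvFlat_eq_nested (x y z e1 e2 : Bool) :
    (x || (e1 && y) || (e1 && e2 && z)) = (x || (e1 && (y || (e2 && z)))) := by
  cases x <;> cases y <;> cases z <;> cases e1 <;> cases e2 <;> rfl

-- two items of a Nodup-keyed dict with the same key are equal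
theorem pvItems_eq_of_fst_eq {d : PySem.Dict String (Int × Int)} (hnd : d.keys.Nodup)
    {it jt : String × Int × Int} (h1 : it ∈ d.items) (h2 : jt ∈ d.items) (h : it.1 = jt.1) :
    it = jt := by
  obtain ⟨k1, v1⟩ := it
  obtain ⟨k2, v2⟩ := jt
  simp only at h
  subst h
  have e1 := PySem.Dict.getD_of_mem_items d h1 hnd (0, 0)
  have e2 := PySem.Dict.getD_of_mem_items d h2 hnd (0, 0)
  rw [e1] at e2
  rw [e2]

-- Python's min keeps the first minimum; when the minimum is strict it is THE minimum, wherever it sits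
theorem pvFoldMin_eq {x : String × Int × Int} :
    ∀ (xs : List (String × Int × Int)) (best : String × Int × Int),
      (x = best ∨ x ∈ xs) →
      (∀ y, (y = best ∨ y ∈ xs) → y = x ∨ pvKeyLt x y = true) →
      xs.foldl (fun best y => if pvKeyLt y best then y else best) best = x := by
  intro xs
  induction xs with
  | nil =>
    intro best hmem _
    rcases hmem with h | h
    · simpa [List.foldl] using h.symm
    · cases h
  | cons a t ih =>
    intro best hmem hmin
    simp only [List.foldl_cons]
    by_cases hxb : x = best
    · subst hxb
      have ha : a = x ∨ pvKeyLt x a = true := hmin a (Or.inr (List.mem_cons_self))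
      have hstep : (if pvKeyLt a x then a else x) = x := by
        rcases ha with rfl | ha
        · simp [pvKeyLt_irrefl]
        · cases hc : pvKeyLt a x with
          | false => simp
          | true => exact (pvKeyLt_asymm ha hc).elim
      rw [hstep]
      exact ih x (Or.inl rfl)
        (fun y hy => hmin y (by rcases hy with rfl | hy; exacts [Or.inl rfl, Or.inr (List.mem_cons_of_mem _ hy)]))
    · rcases hmem with h | h
      · exact absurd h hxb
      rcases List.mem_cons.mp h with rfl | hx
      · -- x = a : the new best is x
        have hb : best = x ∨ pvKeyLt x best = true := hmin best (Or.inl rfl)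
        rcases hb with rfl | hb
        · exact absurd rfl hxb
        rw [if_pos hb]
        exact ih x (Or.inl rfl)
          (fun y hy => hmin y (by rcases hy with rfl | hy; exacts [Or.inr (List.mem_cons_self), Or.inr (List.mem_cons_of_mem _ hy)]))
      · -- x sits further on in the list
        apply ih _ (Or.inr hx)
        intro y hy
        rcases hy with rfl | hy
        · split
          · exact hmin a (Or.inr (List.mem_cons_self))
          · exact hmin best (Or.inl rfl)
        · exact hmin y (Or.inr (List.mem_cons_of_mem _ hy))

theorem pvMinBy_eq {l : List (String × Int × Int)} {x : String × Int × Int}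
    (hmem : x ∈ l) (hmin : ∀ y ∈ l, y = x ∨ pvKeyLt x y = true) : pvMinBy l = some x := by
  cases l with
  | nil => cases hmem
  | cons a t =>
    simp only [pvMinBy, Option.some_inj]
    apply pvFoldMin_eq t a
    · rcases List.mem_cons.mp hmem with rfl | hx
      · exact Or.inl rfl
      · exact Or.inr hx
    · intro y hy
      rcases hy with rfl | hy
      · exact hmin y (List.mem_cons_self)
      · exact hmin y (List.mem_cons_of_mem _ hy)

-- A's stats component is exactly B's phase-1 fold
theorem pvStepA_fst (month : Int) (st : PySem.Dict String (Int × Int) × Option String × Int × Int)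
    (r : String) : (pvStepA month st r).1 = pvStepStats month st.1 r := by
  unfold pvStepA pvStepStats
  cases hp : pvParse r month with
  | none => rfl
  | some pd =>
    obtain ⟨plate, dur⟩ := pd
    dsimp only
    split <;> rfl

theorem pvFoldA_fst (month : Int) :
    ∀ (l : List String) (st : PySem.Dict String (Int × Int) × Option String × Int × Int),
      (l.foldl (pvStepA month) st).1 = l.foldl (pvStepStats month) st.1 := by
  intro l
  induction l with
  | nil => intro st; rfl
  | cons r t ih =>
    intro st
    simp only [List.foldl_cons, ih, pvStepA_fst]

-- the loop invariant: keys are unique; best_plate is None exactly while stats is empty (with the -1 sentinels),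
-- and otherwise the best triple is in stats and strictly key-below every other entry
def pvInv (st : PySem.Dict String (Int × Int) × Option String × Int × Int) : Prop :=
  st.1.keys.Nodup ∧
  (st.2.1 = none → st.1.items = [] ∧ st.2.2.1 = -1 ∧ st.2.2.2 = -1) ∧
  (∀ b, st.2.1 = some b →
    (b, st.2.2.1, st.2.2.2) ∈ st.1.items ∧
    ∀ it ∈ st.1.items, it.1 ≠ b → pvKeyLt (b, st.2.2.1, st.2.2.2) it = true)

theorem pvStepA_inv (month : Int) (st : PySem.Dict String (Int × Int) × Option String × Int × Int)
    (r : String) (h : pvInv st) (hd : ∀ p d, pvParse r month = some (p, d) → 0 ≤ d) :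
    pvInv (pvStepA month st r) := by
  obtain ⟨stats, bp, bt, bc⟩ := st
  unfold pvStepA
  cases hp : pvParse r month with
  | none => exact h
  | some pd =>
    obtain ⟨plate, dur⟩ := pd
    have hdur : 0 ≤ dur := hd _ _ hp
    obtain ⟨hnd, hnone, hsome⟩ := h
    dsimp only at hnd hnone hsome ⊢
    set tc := stats.getD plate (0, 0) with htc
    set stats' := stats.insert plate (tc.1 + dur, tc.2 + 1) with hstats'
    have hg : stats'.getD plate (0, 0) = (tc.1 + dur, tc.2 + 1) :=
      PySem.Dict.getD_insert_self stats plate _ _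
    have hnd' : stats'.keys.Nodup := PySem.Dict.nodup_keys_insert stats plate _ hnd
    have hmemnew : (plate, tc.1 + dur, tc.2 + 1) ∈ stats'.items :=
      PySem.Dict.mem_items_insert_self stats plate _
    rw [hg]
    dsimp only
    cases bp with
    | none =>
      obtain ⟨hit, hbt, hbc⟩ := hnone rfl
      have hkeys : stats.keys = [] := by
        have hk : stats.keys = stats.items.map Prod.fst := rfl
        rw [hk, hit]; rfl
      have hcont : stats.contains plate = false := by
        cases hcontc : stats.contains plate with
        | false => rfl
        | true =>
          have hmk := (PySem.Dict.contains_iff_mem_keys stats plate).mp hcontc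
          rw [hkeys] at hmk
          cases hmk
      have ht1 : tc.1 = 0 := by
        rw [htc, PySem.Dict.getD_of_not_contains stats (0, 0) hcont]
      have hcond : (decide (tc.1 + dur > bt) ||
          ((tc.1 + dur) == bt && decide (tc.2 + 1 > bc)) ||
          ((tc.1 + dur) == bt && (tc.2 + 1) == bc && pvNoneOrLt none plate)) = true := by
        simp only [Bool.or_eq_true, decide_eq_true_eq]
        left; left
        have hbt' : bt = -1 := hbt
        omega
      rw [if_pos hcond]
      refine ⟨hnd', by simp, ?_⟩
      intro b hb
      injection hb with hb
      subst hb
      refine ⟨hmemnew, ?_⟩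
      intro it hit' hne
      rcases (PySem.Dict.mem_items_insert stats plate _ it).mp hit' with rfl | ⟨hmem, _⟩
      · exact absurd rfl hne
      · rw [hit] at hmem; cases hmem
    | some b =>
      obtain ⟨hbmem, hmin⟩ := hsome b rfl
      -- A's flat three-clause condition is the key comparison with the current best
      have hcond_eq : (decide (tc.1 + dur > bt) ||
          ((tc.1 + dur) == bt && decide (tc.2 + 1 > bc)) ||
          ((tc.1 + dur) == bt && (tc.2 + 1) == bc && pvNoneOrLt (some b) plate)) =
          pvKeyLt (plate, tc.1 + dur, tc.2 + 1) (b, bt, bc) := by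
        rw [pvFlat_eq_nested]
        simp [pvKeyLt, pvNoneOrLt]
      rw [hcond_eq]
      by_cases hpb : plate = b
      · -- updating the current best plate itself: strictly better (duration ≥ 0, count grows)
        subst hpb
        have htcb : tc = (bt, bc) := PySem.Dict.getD_of_mem_items stats hbmem hnd (0, 0)
        have ht1 : tc.1 = bt := by rw [htcb]
        have ht2 : tc.2 = bc := by rw [htcb]
        have hlt : pvKeyLt (plate, tc.1 + dur, tc.2 + 1) (plate, bt, bc) = true := by
          simp only [pvKeyLt, Bool.or_eq_true, Bool.and_eq_true, decide_eq_true_eq, beq_iff_eq]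
          rcases lt_or_eq_of_le hdur with hO | hO
          · left; omega
          · right; exact ⟨by omega, Or.inl (by omega)⟩
        rw [if_pos hlt]
        refine ⟨hnd', by simp, ?_⟩
        intro b' hb'
        injection hb' with hb'
        subst hb'
        refine ⟨hmemnew, ?_⟩
        intro it hit' hne
        rcases (PySem.Dict.mem_items_insert stats plate _ it).mp hit' with rfl | ⟨hmem, _⟩
        · exact absurd rfl hne
        · exact pvKeyLt_trans hlt (hmin it hmem hne)
      · -- a different plate
        cases hc : pvKeyLt (plate, tc.1 + dur, tc.2 + 1) (b, bt, bc) with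
        | true =>
          rw [if_pos rfl]
          refine ⟨hnd', by simp, ?_⟩
          intro b' hb'
          injection hb' with hb'
          subst hb'
          refine ⟨hmemnew, ?_⟩
          intro it hit' hne
          rcases (PySem.Dict.mem_items_insert stats plate _ it).mp hit' with rfl | ⟨hmem, hfst⟩
          · exact absurd rfl hne
          · by_cases hib : it.1 = b
            · have heq : it = (b, bt, bc) := pvItems_eq_of_fst_eq hnd hmem hbmem hib
              rw [heq]
              exact hc
            · exact pvKeyLt_trans hc (hmin it hmem hib)
        | false =>
          rw [if_neg (by simp)]
          have hba : pvKeyLt (b, bt, bc) (plate, tc.1 + dur, tc.2 + 1) = true :=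
            pvKeyLt_total hpb hc
          refine ⟨hnd', by simp, ?_⟩
          intro b' hb'
          injection hb' with hb'
          subst hb'
          constructor
          · exact (PySem.Dict.mem_items_insert stats plate _ _).mpr
              (Or.inr ⟨hbmem, Ne.symm hpb⟩)
          · intro it hit' hne
            rcases (PySem.Dict.mem_items_insert stats plate _ it).mp hit' with rfl | ⟨hmem, _⟩
            · exact hba
            · exact hmin it hmem hne

theorem pvFoldA_inv (month : Int) :
    ∀ (l : List String) (st : PySem.Dict String (Int × Int) × Option String × Int × Int),
      pvInv st → (∀ r ∈ l, ∀ p d, pvParse r month = some (p, d) → 0 ≤ d) →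
      pvInv (l.foldl (pvStepA month) st) := by
  intro l
  induction l with
  | nil => intro st h _; exact h
  | cons r t ih =>
    intro st h hall
    simp only [List.foldl_cons]
    exact ih _ (pvStepA_inv month st r h (hall r (List.mem_cons_self)))
      (fun r' hr' => hall r' (List.mem_cons_of_mem _ hr'))

theorem pvInv_init : pvInv ((PySem.Dict.empty : PySem.Dict String (Int × Int)), none, -1, -1) := by
  refine ⟨PySem.Dict.nodup_keys_empty, fun _ => ⟨rfl, rfl, rfl⟩, ?_⟩
  intro b hb
  cases hb

-- ===== VERDICT (by name: the statement is the Claim_ definition above) =====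
theorem findTopVehicle_spec : Claim_equal_findTopVehicle := by
  intro records month _ hpre
  unfold Spec_findTopVehicle findTopVehicle findTopVehicle_alt
  have hpre' : ∀ r ∈ records, ∀ p d, pvParse r month = some (p, d) → 0 ≤ d := by
    intro r hr p d hp
    unfold Pre_findTopVehicle at hpre
    have := List.all_eq_true.mp hpre r hr
    rw [hp] at this
    simpa using this
  have hinv := pvFoldA_inv month records _ pvInv_init hpre'
  have hfst := pvFoldA_fst month records (PySem.Dict.empty, none, -1, -1)
  dsimp only at hfst
  set st := records.foldl (pvStepA month) (PySem.Dict.empty, none, -1, -1) with hst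
  obtain ⟨hnd, hnone, hsome⟩ := hinv
  cases hbp : st.2.1 with
  | none =>
    obtain ⟨hit, _, _⟩ := hnone hbp
    rw [← hfst, hit]
    rfl
  | some b =>
    obtain ⟨hbmem, hmin⟩ := hsome b hbp
    rw [← hfst]
    have : pvMinBy st.1.items = some (b, st.2.2.1, st.2.2.2) := by
      apply pvMinBy_eq hbmem
      intro y hy
      by_cases hyb : y.1 = b
      · exact Or.inl (pvItems_eq_of_fst_eq hnd hy hbmem hyb)
      · exact Or.inr (hmin y hy hyb)
    rw [this]
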